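-- pv_equiv track=rewrite | github.com/kyeob1107/programmers | 프로그래머스/1/134240. 푸드 파이트 대회/푸드 파이트 대회.py | solution
-- ===== SOURCE A (Python) =====
-- def solution(food):
--     answer = ''
--     for i in range(1,len(food)): #왼쪽
--         answer+=str(i)*(food[i]//2)
--     answer+='0' #중앙 물
--     for j in range(len(food)-1,0,-1): #오른쪽
--         answer+=str(j)*(food[j]//2)
--
--     return answer
-- ===== SOURCE B (Python) =====
-- def solution(food):
--     def halves(lo, hi):
--         # returns (left, right) for food indices lo..hi-1, where right is the
--         # mirrored (segment-reversed) concatenation of the same segments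
--         if hi - lo <= 0:
--             return ('', '')
--         if hi - lo == 1:
--             seg = str(lo) * (food[lo] // 2)
--             return (seg, seg)
--         mid = (lo + hi) // 2
--         l1, r1 = halves(lo, mid)
--         l2, r2 = halves(mid, hi)
--         return (l1 + l2, r2 + r1)
--     left, right = halves(1, len(food))
--     return left + '0' + right
-- ===== Notes on version B (the rewrite author's own statement) =====
-- stated objective: alternative
-- what changed: B replaces A's two staged index loops (forward half, centre, backward half with re-indexing) by one divide-and-conquer recursion that returns both mirrored halves of each index range at once, merging them symmetrically, so there is no second scan and no countdown loop.
import Mathlib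
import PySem

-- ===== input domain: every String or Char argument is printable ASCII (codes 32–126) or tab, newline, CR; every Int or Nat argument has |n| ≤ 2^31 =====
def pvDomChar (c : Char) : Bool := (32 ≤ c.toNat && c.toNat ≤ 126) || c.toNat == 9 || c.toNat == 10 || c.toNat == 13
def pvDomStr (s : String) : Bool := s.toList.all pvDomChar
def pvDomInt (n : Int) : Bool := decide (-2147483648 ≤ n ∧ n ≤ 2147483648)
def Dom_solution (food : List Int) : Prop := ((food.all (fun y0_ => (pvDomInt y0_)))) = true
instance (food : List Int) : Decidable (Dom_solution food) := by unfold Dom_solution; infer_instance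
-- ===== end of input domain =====

-- B builds the palindrome outside-in by a single recursion wrapping each segment symmetrically, instead of A's forward loop + centre + backward loop.
-- ===== PORT A =====
def solution (food : List Int) : String :=
  let answer : List Char := (PySem.List.pyRange 1 (PySem.List.len food) 1).foldl
    (fun acc i => acc ++ PySem.List.pyRepeat (PySem.Int.toChars i) (PySem.Int.floordiv (PySem.List.pyGetD food i 0) 2)) []
  let answer := answer ++ ['0']
  let answer := (PySem.List.pyRange (PySem.List.len food - 1) 0 (-1)).foldl
    (fun acc j => acc ++ PySem.List.pyRepeat (PySem.Int.toChars j) (PySem.Int.floordiv (PySem.List.pyGetD food j 0) 2)) answer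
  String.mk answer

-- ===== PORT B =====
-- divide and conquer, mirroring Source B's halves(lo, hi): returns (left, mirrored right) for indices lo..hi-1
def halvesB (food : List Int) (lo hi : Int) : List Char × List Char :=
  if hi - lo ≤ 0 then ([], [])
  else if hi - lo = 1 then
    let seg := PySem.List.pyRepeat (PySem.Int.toChars lo) (PySem.Int.floordiv (PySem.List.pyGetD food lo 0) 2)
    (seg, seg)
  else
    let mid := PySem.Int.floordiv (lo + hi) 2
    let p1 := halvesB food lo mid
    let p2 := halvesB food mid hi
    (p1.1 ++ p2.1, p2.2 ++ p1.2)
termination_by (hi - lo).toNat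
decreasing_by
  · have hm2 : PySem.Int.floordiv (lo + hi) 2 < hi :=
      (PySem.Int.floordiv_lt_iff_lt_mul (by norm_num)).mpr (by omega)
    omega
  · have hm1 : lo + 1 ≤ PySem.Int.floordiv (lo + hi) 2 :=
      (PySem.Int.le_floordiv_iff_mul_le (by norm_num)).mpr (by omega)
    omega

def solution_alt (food : List Int) : String :=
  let p := halvesB food 1 (PySem.List.len food)
  String.mk (p.1 ++ ['0'] ++ p.2)

-- ===== PRECONDITION & SPEC =====
def Spec_solution (food : List Int) (out : String) : Prop := out = solution_alt food
instance (food : List Int) (out : String) : Decidable (Spec_solution food out) := by unfold Spec_solution; infer_instance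

-- ===== CLAIM (what is proved, stated in full; the proofs are below) =====
def Claim_equal_solution : Prop := ∀ (food : List Int), Dom_solution food → Spec_solution food (solution food)

-- ===== LEMMAS AND PROOFS =====

-- the segment for index j
def segF (food : List Int) (j : Int) : List Char :=
  PySem.List.pyRepeat (PySem.Int.toChars j) (PySem.Int.floordiv (PySem.List.pyGetD food j 0) 2)

lemma halvesB_eq (food : List Int) (lo hi : Int) :
    halvesB food lo hi =
      (((PySem.List.pyRange lo hi 1).map (segF food)).flatten,
       ((PySem.List.pyRange lo hi 1).reverse.map (segF food)).flatten) := by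
  induction hn : (hi - lo).toNat using Nat.strong_induction_on generalizing lo hi with
  | _ n ih =>
    rw [halvesB]
    by_cases h0 : hi - lo ≤ 0
    · rw [PySem.List.pyRange_one_eq_nil (by omega)]
      rw [if_pos h0]
      simp
    · by_cases h1 : hi - lo = 1
      · have hhi : hi = lo + 1 := by omega
        subst hhi
        rw [PySem.List.pyRange_one_singleton]
        simp [segF]
      · have hm1 : lo + 1 ≤ PySem.Int.floordiv (lo + hi) 2 :=
          (PySem.Int.le_floordiv_iff_mul_le (by norm_num)).mpr (by omega)
        have hm2 : PySem.Int.floordiv (lo + hi) 2 < hi :=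
          (PySem.Int.floordiv_lt_iff_lt_mul (by norm_num)).mpr (by omega)
        rw [if_neg h0, if_neg h1]
        dsimp only
        rw [ih ((PySem.Int.floordiv (lo + hi) 2) - lo).toNat (by omega) lo _ rfl,
            ih (hi - PySem.Int.floordiv (lo + hi) 2).toNat (by omega) _ hi rfl]
        rw [PySem.List.pyRange_one_append lo (PySem.Int.floordiv (lo + hi) 2) hi (by omega) (by omega)]
        simp

-- ===== VERDICT (by name: the statement is the Claim_ definition above) =====
theorem solution_spec : Claim_equal_solution := by
  intro food _
  unfold Spec_solution solution solution_alt
  rw [halvesB_eq]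
  rw [PySem.List.pyRange_neg_one_eq_reverse]
  simp only [PySem.List.len_eq]
  norm_num
  have hseg : segF food = fun j => PySem.List.pyRepeat (PySem.Int.toChars j) (PySem.List.pyGetD food j 0 / 2) := funext fun j => by
    rw [segF, PySem.Int.floordiv_eq_ediv_of_pos (by norm_num : (0:Int) < 2)]
  rw [hseg]
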